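-- pv_equiv track=rewrite | github.com/Leahkkkkk/GailBot | interface/gui/view/widgets/GraphDisplay.py | getShortHand
-- ===== SOURCE A (Python) =====
-- def getShortHand(name) -> str:
--     """ given a plugin name, shrink the name of the plugin if the name is too
--         long to be able to fit the word into the graph
--     """
--     if "Plugin" in name:
--         res = name.replace("Plugin", "")
--     else:
--         res = name
--     if len(res) > 10:
--         new_text=""
--         count = 0
--         for i in range(len(res)):
--             if res[i].isupper():
--                 count += 1
--                 if count == 2:
--                     new_text += '\n'
--             new_text += res[i]
--         return new_text
--     return res
-- ===== SOURCE B (Python) =====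
-- def getShortHand(name) -> str:
--     """Shorten a plugin name: strip 'Plugin', and if still long insert a
--     newline before the second uppercase letter (locate-then-slice)."""
--     if "Plugin" in name:
--         res = name.replace("Plugin", "")
--     else:
--         res = name
--     if len(res) > 10:
--         ups = [i for i, c in enumerate(res) if c.isupper()]
--         if len(ups) >= 2:
--             idx = ups[1]
--             return res[:idx] + '\n' + res[idx:]
--     return res
-- ===== Notes on version B (the rewrite author's own statement) =====
-- stated objective: simpler
-- what changed: Replaces A's char-by-char rebuilding loop with a running uppercase counter by locating the uppercase positions once and doing a single slice-and-join at the second uppercase index.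
import Mathlib
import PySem

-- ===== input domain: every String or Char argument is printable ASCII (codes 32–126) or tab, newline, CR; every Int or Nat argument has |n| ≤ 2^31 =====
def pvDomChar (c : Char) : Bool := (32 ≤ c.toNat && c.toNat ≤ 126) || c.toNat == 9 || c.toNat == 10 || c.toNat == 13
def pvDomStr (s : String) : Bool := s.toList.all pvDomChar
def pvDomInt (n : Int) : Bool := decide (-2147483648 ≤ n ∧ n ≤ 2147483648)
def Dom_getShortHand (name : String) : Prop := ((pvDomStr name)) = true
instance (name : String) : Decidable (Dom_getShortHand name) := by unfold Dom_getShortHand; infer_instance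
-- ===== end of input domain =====

-- B replaces A's char-by-char rebuilding loop by locate-the-second-uppercase then one slice-and-join (simpler decomposition; same result).


-- ===== PORT A =====
-- loop body of A's `for i in range(len(res))`: state = (new_text, count)
def pvStepA (st : List Char × Int) (c : Char) : List Char × Int :=
  if PySem.Chars.isupper c then
    let count := st.2 + 1
    let nt := if count == 2 then st.1 ++ ['\n'] else st.1
    (nt ++ [c], count)
  else (st.1 ++ [c], st.2)

def getShortHand (name : String) : String :=
  let res := if PySem.Str.isIn "Plugin" name then PySem.Str.replace name "Plugin" "" else name
  if PySem.Str.len res > 10 then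
    String.ofList (res.toList.foldl pvStepA ([], 0)).1
  else res

-- ===== PORT B =====
-- B's comprehension: uppercase positions of the (already shortened) name
def pvUpsB (r : List Char) : List Int :=
  ((PySem.List.enumerate r 0).filter (fun p => PySem.Chars.isupper p.2)).map (·.1)

def getShortHand_alt (name : String) : String :=
  let res := if PySem.Str.isIn "Plugin" name then PySem.Str.replace name "Plugin" "" else name
  if PySem.Str.len res > 10 then
    let ups := pvUpsB res.toList
    if 2 ≤ ups.length then
      match PySem.List.pyGet? ups 1 with
      | some idx =>
          String.ofList (PySem.List.slice res.toList none (some idx)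
            ++ '\n' :: PySem.List.slice res.toList (some idx) none)
      | none => res   -- unreachable: guarded by len(ups) >= 2
    else res
  else res

-- ===== PRECONDITION & SPEC =====
def Spec_getShortHand (name : String) (out : String) : Prop := out = getShortHand_alt name
instance (name : String) (out : String) : Decidable (Spec_getShortHand name out) := by unfold Spec_getShortHand; infer_instance

-- ===== CLAIM (what is proved, stated in full; the proofs are below) =====
def Claim_equal_getShortHand : Prop := ∀ (name : String), Dom_getShortHand name → Spec_getShortHand name (getShortHand name)

-- ===== LEMMAS AND PROOFS =====

-- index of the first / second uppercase character
def pvIdx1 (r : List Char) : Option Nat := List.findIdx? (fun c => PySem.Chars.isupper c) r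

def pvIdx2 : List Char → Option Nat
  | [] => none
  | c :: cs => if PySem.Chars.isupper c then (pvIdx1 cs).map (· + 1) else (pvIdx2 cs).map (· + 1)

def pvIns (r : List Char) (i : Nat) : List Char := r.take i ++ '\n' :: r.drop i

def pvUps (s : Int) (r : List Char) : List Int :=
  ((PySem.List.enumerate r s).filter (fun p => PySem.Chars.isupper p.2)).map (·.1)

lemma pvStepA_true {st : List Char × Int} {c : Char} (h : PySem.Chars.isupper c = true) :
    pvStepA st c = ((if st.2 + 1 == 2 then st.1 ++ ['\n'] else st.1) ++ [c], st.2 + 1) := by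
  simp [pvStepA, h]

lemma pvStepA_false {st : List Char × Int} {c : Char} (h : PySem.Chars.isupper c = false) :
    pvStepA st c = (st.1 ++ [c], st.2) := by
  simp [pvStepA, h]

lemma loop_ge2 (r : List Char) : ∀ (nt : List Char) (count : Int), 2 ≤ count →
    (r.foldl pvStepA (nt, count)).1 = nt ++ r := by
  induction r with
  | nil => intro nt count _; simp
  | cons c cs ih =>
    intro nt count h
    by_cases hc : PySem.Chars.isupper c = true
    · have h2 : (count + 1 == 2) = false := by simp; omega
      simp only [List.foldl_cons, pvStepA_true hc]
      rw [h2]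
      simp only [Bool.false_eq_true, if_false]
      rw [ih (nt ++ [c]) (count + 1) (by omega)]; simp
    · simp only [List.foldl_cons, pvStepA_false (by simpa using hc)]
      rw [ih (nt ++ [c]) count h]; simp

lemma loop_one (r : List Char) : ∀ (nt : List Char),
    (r.foldl pvStepA (nt, 1)).1 =
      nt ++ (match pvIdx1 r with | some i => pvIns r i | none => r) := by
  induction r with
  | nil => intro nt; simp [pvIdx1]
  | cons c cs ih =>
    intro nt
    by_cases hc : PySem.Chars.isupper c = true
    · simp only [List.foldl_cons, pvStepA_true hc]
      norm_num
      rw [loop_ge2 cs _ 2 (le_refl _)]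
      simp [pvIdx1, List.findIdx?_cons, hc, pvIns]
    · have hc' : PySem.Chars.isupper c = false := by simpa using hc
      simp only [List.foldl_cons, pvStepA_false hc']
      rw [ih (nt ++ [c])]
      simp only [pvIdx1, List.findIdx?_cons, hc']
      cases h1 : List.findIdx? (fun c => PySem.Chars.isupper c) cs with
      | none => simp
      | some i => simp [pvIns]

lemma loop_zero (r : List Char) : ∀ (nt : List Char),
    (r.foldl pvStepA (nt, 0)).1 =
      nt ++ (match pvIdx2 r with | some i => pvIns r i | none => r) := by
  induction r with
  | nil => intro nt; simp [pvIdx2]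
  | cons c cs ih =>
    intro nt
    by_cases hc : PySem.Chars.isupper c = true
    · simp only [List.foldl_cons, pvStepA_true hc]
      norm_num
      rw [loop_one cs (nt ++ [c])]
      simp only [pvIdx2, hc, if_true]
      cases h1 : pvIdx1 cs with
      | none => simp
      | some i => simp [pvIns]
    · have hc' : PySem.Chars.isupper c = false := by simpa using hc
      simp only [List.foldl_cons, pvStepA_false hc']
      rw [ih (nt ++ [c])]
      simp only [pvIdx2, hc']
      cases h1 : pvIdx2 cs with
      | none => simp
      | some i => simp [pvIns]

lemma pvUps_cons (s : Int) (c : Char) (r : List Char) :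
    pvUps s (c :: r) = if PySem.Chars.isupper c then s :: pvUps (s + 1) r else pvUps (s + 1) r := by
  simp only [pvUps, PySem.List.enumerate_cons, List.filter_cons]
  by_cases hc : PySem.Chars.isupper c = true <;> simp [hc]

lemma pvUps_get0 (r : List Char) : ∀ (s : Int),
    (pvUps s r)[0]? = (pvIdx1 r).map (fun i => s + (i : Int)) := by
  induction r with
  | nil => intro s; simp [pvUps, pvIdx1]
  | cons c cs ih =>
    intro s
    rw [pvUps_cons]
    by_cases hc : PySem.Chars.isupper c = true
    · simp [hc, pvIdx1, List.findIdx?_cons]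
    · rw [if_neg hc, ih (s + 1)]
      rw [show pvIdx1 (c :: cs) = (pvIdx1 cs).map (· + 1) by
        simp [pvIdx1, List.findIdx?_cons, hc]]
      cases h1 : pvIdx1 cs with
      | none => simp
      | some i => simp; omega

lemma pvUps_get1 (r : List Char) : ∀ (s : Int),
    (pvUps s r)[1]? = (pvIdx2 r).map (fun i => s + (i : Int)) := by
  induction r with
  | nil => intro s; simp [pvUps, pvIdx2]
  | cons c cs ih =>
    intro s
    rw [pvUps_cons]
    by_cases hc : PySem.Chars.isupper c = true
    · rw [if_pos hc, List.getElem?_cons_succ, pvUps_get0 cs (s + 1)]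
      rw [show pvIdx2 (c :: cs) = (pvIdx1 cs).map (· + 1) by simp [pvIdx2, hc]]
      cases h1 : pvIdx1 cs with
      | none => simp
      | some i => simp; omega
    · rw [if_neg hc, ih (s + 1)]
      rw [show pvIdx2 (c :: cs) = (pvIdx2 cs).map (· + 1) by simp [pvIdx2, hc]]
      cases h1 : pvIdx2 cs with
      | none => simp
      | some i => simp; omega

lemma pvUps_len_iff (r : List Char) (s : Int) :
    2 ≤ (pvUps s r).length ↔ (pvIdx2 r).isSome := by
  have h := pvUps_get1 r s
  constructor
  · intro hl
    have h1 : (pvUps s r)[1]?.isSome := by simp; omega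
    rw [h] at h1
    cases hz : pvIdx2 r <;> simp [hz] at h1 ⊢
  · intro hs
    have h1 : (pvUps s r)[1]?.isSome := by
      rw [h]; cases hz : pvIdx2 r <;> simp_all
    simp at h1; omega

-- the heart: A's loop result equals B's slice expression, for any shortened name
lemma pvUpsB_eq (r : List Char) : pvUpsB r = pvUps 0 r := rfl

lemma body_eq (res : String) :
    String.ofList ((res.toList).foldl pvStepA ([], 0)).1 =
      (if 2 ≤ (pvUpsB res.toList).length then
        match PySem.List.pyGet? (pvUpsB res.toList) 1 with
        | some idx =>
            String.ofList (PySem.List.slice res.toList none (some idx)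
              ++ '\n' :: PySem.List.slice res.toList (some idx) none)
        | none => res
      else res) := by
  rw [loop_zero res.toList [], pvUpsB_eq]
  set r := res.toList with hr
  by_cases h : 2 ≤ (pvUps 0 r).length
  · rw [if_pos h]
    have hs : (pvIdx2 r).isSome := (pvUps_len_iff r 0).1 h
    obtain ⟨i, hi⟩ := Option.isSome_iff_exists.1 hs
    have hget : PySem.List.pyGet? (pvUps 0 r) 1 = some (i : Int) := by
      have h1 : ((1 : Nat) : Int) = (1 : Int) := by norm_num
      rw [← h1, PySem.List.pyGet?_natCast, pvUps_get1 r 0, hi]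
      simp
    rw [hget]
    have hsl1 : PySem.List.slice r none (some (i : Int)) = r.take i := by
      rw [PySem.List.slice_to] <;> simp
    have hsl2 : PySem.List.slice r (some (i : Int)) none = r.drop i := by
      rw [PySem.List.slice_from] <;> simp
    dsimp only
    rw [hsl1, hsl2, hi]
    simp [pvIns]
  · rw [if_neg h]
    have hz : pvIdx2 r = none := by
      cases hn : pvIdx2 r with
      | none => rfl
      | some i => exact absurd ((pvUps_len_iff r 0).2 (by simp [hn])) h
    rw [hz]
    simp [hr]

-- ===== VERDICT (by name: the statement is the Claim_ definition above) =====
theorem getShortHand_spec : Claim_equal_getShortHand := by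
  intro name _
  unfold Spec_getShortHand getShortHand getShortHand_alt
  generalize (if PySem.Str.isIn "Plugin" name then PySem.Str.replace name "Plugin" "" else name) = res
  by_cases hlen : PySem.Str.len res > 10
  · rw [if_pos hlen, if_pos hlen]
    exact body_eq res
  · rw [if_neg hlen, if_neg hlen]
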